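-- pv_equiv track=rewrite | github.com/Andrevile/Algorithm | BOJ PS/No.2212 센서.py | result
-- ===== SOURCE A (Python) =====
-- def result(N,K,pos):
--     pos.sort()
--     if K>N:
--         return 0
--     distance=[]
--     for i in range(0,N-1):
--         distance.append(pos[i+1]-pos[i])
--     distance.sort(reverse=True)
--     for k in range(0,K-1):
--         distance.pop(0)
--     return sum(distance)
-- ===== SOURCE B (Python) =====
-- def _ins(top, g):
--     lo, hi = 0, len(top)
--     while lo < hi:
--         mid = (lo + hi) // 2
--         if top[mid] < g:
--             lo = mid + 1
--         else:
--             hi = mid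
--     top.insert(lo, g)
--
-- def result(N, K, pos):
--     pos.sort()
--     if K > N or N < 2:
--         return 0
--     gaps = [pos[i + 1] - pos[i] for i in range(N - 1)]
--     keep = []
--     for g in gaps:
--         if len(keep) < K - 1:
--             _ins(keep, g)
--         elif keep and keep[0] < g:
--             del keep[0]
--             _ins(keep, g)
--     return (pos[N - 1] - pos[0]) - sum(keep)
-- ===== Notes on version B (the rewrite author's own statement) =====
-- stated objective: alternative
-- what changed: A sorts the gap list descending and pops the K-1 largest before summing; B never sorts the gaps: it keeps a bounded ordered buffer of the K-1 largest gaps in one pass and returns the total span pos[N-1]-pos[0] minus that buffer's sum.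
import Mathlib
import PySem

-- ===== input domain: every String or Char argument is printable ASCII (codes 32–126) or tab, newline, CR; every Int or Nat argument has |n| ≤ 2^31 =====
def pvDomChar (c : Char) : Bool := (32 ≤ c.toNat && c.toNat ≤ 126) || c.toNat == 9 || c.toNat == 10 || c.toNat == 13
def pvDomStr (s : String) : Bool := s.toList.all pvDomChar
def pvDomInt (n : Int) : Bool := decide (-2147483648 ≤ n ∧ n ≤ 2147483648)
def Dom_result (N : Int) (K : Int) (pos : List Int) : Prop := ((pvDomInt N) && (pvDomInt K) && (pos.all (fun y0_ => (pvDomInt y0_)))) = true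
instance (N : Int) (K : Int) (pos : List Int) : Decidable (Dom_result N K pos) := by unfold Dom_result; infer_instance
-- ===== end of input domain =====

-- B replaces A's "sort the gaps descending, pop the K-1 largest, sum the rest" by the complementary
-- framing "total span pos[N-1]-pos[0] minus the sum of the K-1 largest gaps", selecting those K-1
-- largest in one pass over the gaps with a bounded ordered buffer (no sort of the gap list).
-- Both A and B sort pos in place (the same mutation); the equivalence proved is about the return value.

-- ===== PORT A =====
def result (N : Int) (K : Int) (pos : List Int) : Int :=
  let p := PySem.List.sorted pos (fun x => x) false
  if K > N then 0
  else
    let distance := (PySem.List.pyRange 0 (N - 1) 1).foldl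
      (fun d i => d ++ [PySem.List.pyGetD p (i + 1) 0 - PySem.List.pyGetD p i 0]) []
    let distance := PySem.List.sorted distance (fun x => x) true
    let distance := (PySem.List.pyRange 0 (K - 1) 1).foldl
      (fun d _ => ((PySem.List.pop? d 0).map (fun r => r.2)).getD d) distance
    distance.sum

-- ===== PORT B =====
-- _ins's while loop: binary search for the insertion spot of g in the ascending list top
def bsL (top : List Int) (g : Int) (lo hi : Nat) : Nat :=
  if lo < hi then
    if top.getD ((lo + hi) / 2) 0 < g then bsL top g ((lo + hi) / 2 + 1) hi
    else bsL top g lo ((lo + hi) / 2)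
  else lo
termination_by hi - lo
decreasing_by all_goals omega

-- _ins: insert g into the ascending list top at the found spot, keeping it ascending
def insB (top : List Int) (g : Int) : List Int :=
  let lo := bsL top g 0 top.length
  PySem.List.insert top (lo : Int) g

-- body of B's for-loop over the gaps
def stepK (K : Int) (keep : List Int) (g : Int) : List Int :=
  if (keep.length : Int) < K - 1 then insB keep g
  else match keep with
    | [] => []
    | b :: r => if b < g then insB r g else b :: r

def result_alt (N : Int) (K : Int) (pos : List Int) : Int :=
  let p := PySem.List.sorted pos (fun x => x) false
  if K > N ∨ N < 2 then 0
  else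
    let gaps := (PySem.List.pyRange 0 (N - 1) 1).map
      (fun i => PySem.List.pyGetD p (i + 1) 0 - PySem.List.pyGetD p i 0)
    let keep := gaps.foldl (stepK K) []
    (PySem.List.pyGetD p (N - 1) 0 - PySem.List.pyGetD p 0 0) - keep.sum

-- ===== PRECONDITION & SPEC =====
-- Pre_ excludes exactly the inputs where A raises IndexError: pos[i+1] with N > len(pos),
-- reached only when the gap loop runs (N ≥ 2) and is not skipped by the early return (K ≤ N).
def Pre_result (N : Int) (K : Int) (pos : List Int) : Prop :=
  N ≤ pos.length ∨ N < K ∨ N ≤ 1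
instance (N : Int) (K : Int) (pos : List Int) : Decidable (Pre_result N K pos) := by
  unfold Pre_result; infer_instance
def pvWitness_result : Int × Int × List Int := (4, 2, [1, 10, 12, 20])
def Spec_result (N : Int) (K : Int) (pos : List Int) (out : Int) : Prop := out = result_alt N K pos
instance (N : Int) (K : Int) (pos : List Int) (out : Int) : Decidable (Spec_result N K pos out) := by unfold Spec_result; infer_instance

-- ===== CLAIM (what is proved, stated in full; the proofs are below) =====
def Claim_equal_result : Prop := ∀ (N : Int) (K : Int) (pos : List Int), Dom_result N K pos → Pre_result N K pos → Spec_result N K pos (result N K pos)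

-- ===== LEMMAS AND PROOFS =====

-- proof-side model of insertion into an ascending list (structural form of _ins)
def insG : List Int → Int → List Int
  | [], g => [g]
  | b :: t, g => if g ≤ b then g :: b :: t else b :: insG t g

theorem getD_mono (l : List Int) (hs : l.Pairwise (· ≤ ·)) (i j : Nat)
    (hij : i ≤ j) (hj : j < l.length) : l.getD i 0 ≤ l.getD j 0 := by
  rcases Nat.eq_or_lt_of_le hij with h | h
  · rw [h]
  · rw [List.getD_eq_getElem l 0 (by omega), List.getD_eq_getElem l 0 hj]
    exact List.pairwise_iff_getElem.1 hs i j (by omega) hj h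

-- what the binary search returns: the first index whose element is not < g
theorem bs_spec (top : List Int) (g : Int) (hs : top.Pairwise (· ≤ ·)) :
    ∀ (d lo hi : Nat), hi - lo = d → lo ≤ hi → hi ≤ top.length →
    (∀ j, j < lo → top.getD j 0 < g) →
    (∀ j, hi ≤ j → j < top.length → g ≤ top.getD j 0) →
    lo ≤ bsL top g lo hi ∧ bsL top g lo hi ≤ hi ∧
    (∀ j, j < bsL top g lo hi → top.getD j 0 < g) ∧
    (∀ j, bsL top g lo hi ≤ j → j < top.length → g ≤ top.getD j 0) := by
  intro d
  induction d using Nat.strong_induction_on with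
  | _ d ih =>
      intro lo hi hd hlh hhl hP1 hP2
      rw [bsL]
      by_cases h : lo < hi
      · rw [if_pos h]
        by_cases hm : top.getD ((lo + hi) / 2) 0 < g
        · rw [if_pos hm]
          have := ih (hi - ((lo + hi) / 2 + 1)) (by omega) ((lo + hi) / 2 + 1) hi rfl
            (by omega) hhl
            (by
              intro j hj
              have hjm : j ≤ (lo + hi) / 2 := by omega
              exact lt_of_le_of_lt (getD_mono top hs j ((lo + hi) / 2) hjm (by omega)) hm)
            hP2
          exact ⟨by omega, this.2.1, this.2.2.1, this.2.2.2⟩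
        · rw [if_neg hm]
          have := ih (((lo + hi) / 2) - lo) (by omega) lo ((lo + hi) / 2) rfl
            (by omega) (by omega) hP1
            (by
              intro j hj hjl
              exact le_trans (not_lt.1 hm) (getD_mono top hs ((lo + hi) / 2) j hj hjl))
          exact ⟨this.1, by omega, this.2.2.1, this.2.2.2⟩
      · rw [if_neg h]
        have : lo = hi := by omega
        exact ⟨le_refl _, hlh, fun j hj => hP1 j hj,
          fun j hj hjl => hP2 j (by omega) hjl⟩


-- A's append-loop builds the map
theorem foldl_app_map (f : Int → Int) (l : List Int) (acc : List Int) :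
    l.foldl (fun d i => d ++ [f i]) acc = acc ++ l.map f := by
  induction l generalizing acc with
  | nil => simp
  | cons x t ih => simp [List.foldl_cons, ih, List.append_assoc]

-- A's pop(0)-loop is drop
theorem foldl_pop_drop (r : List Int) (l : List Int) (h : r.length ≤ l.length) :
    r.foldl (fun d _ => ((PySem.List.pop? d 0).map (fun x => x.2)).getD d) l
      = l.drop r.length := by
  induction r generalizing l with
  | nil => simp
  | cons a r ih =>
      cases l with
      | nil => simp at h
      | cons b l =>
          simp only [List.foldl_cons, PySem.List.pop?_zero_cons, Option.map_some, Option.getD_some]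
          rw [ih l (by simpa using h)]
          simp

theorem insG_perm (t : List Int) (g : Int) : (insG t g).Perm (g :: t) := by
  induction t with
  | nil => simp [insG]
  | cons b r ih =>
      simp only [insG]
      split
      · exact List.Perm.refl _
      · exact ((ih.cons b).trans (List.Perm.swap g b r))

theorem insG_length (t : List Int) (g : Int) : (insG t g).length = t.length + 1 :=
  (insG_perm t g).length_eq

theorem insG_sorted (t : List Int) (g : Int) (h : t.Pairwise (· ≤ ·)) :
    (insG t g).Pairwise (· ≤ ·) := by
  induction t with
  | nil => simp [insG]
  | cons b r ih =>
      rw [List.pairwise_cons] at h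
      simp only [insG]
      split
      · rename_i hle
        refine List.pairwise_cons.2 ⟨?_, List.pairwise_cons.2 ⟨h.1, h.2⟩⟩
        intro x hx
        rcases List.mem_cons.1 hx with hx1 | hx1
        · exact hx1 ▸ hle
        · exact le_trans hle (h.1 x hx1)
      · rename_i hgt
        rw [not_le] at hgt
        refine List.pairwise_cons.2 ⟨?_, ih h.2⟩
        intro x hx
        rcases List.mem_cons.1 ((insG_perm r g).mem_iff.1 hx) with hx1 | hx1
        · exact hx1 ▸ le_of_lt hgt
        · exact h.1 x hx1

theorem insG_append_of_lt (u v : List Int) (g : Int) (h : ∀ x ∈ u, x < g) :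
    insG (u ++ v) g = u ++ insG v g := by
  induction u with
  | nil => simp
  | cons c u ih =>
      have hc : ¬ g ≤ c := not_le.2 (h c (by simp))
      simp only [List.cons_append, insG, if_neg hc]
      rw [ih (fun x hx => h x (by simp [hx]))]

theorem insG_append_of_ge (u v : List Int) (g : Int) (h : ∃ x ∈ u, g ≤ x) :
    insG (u ++ v) g = insG u g ++ v := by
  induction u with
  | nil => simp at h
  | cons c u ih =>
      by_cases hc : g ≤ c
      · simp [insG, if_pos hc]
      · obtain ⟨x, hx, hgx⟩ := h
        have hx' : x ∈ u := by
          rcases List.mem_cons.1 hx with h1 | h1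
          · exact absurd (h1 ▸ hgx) hc
          · exact h1
        simp only [List.cons_append, insG, if_neg hc]
        rw [ih ⟨x, hx', hgx⟩]

-- the binary-search insertion is the structural insertion on an ascending list
theorem insB_eq_insG (top : List Int) (g : Int) (hs : top.Pairwise (· ≤ ·)) :
    insB top g = insG top g := by
  obtain ⟨h0, hr, hlt, hge⟩ := bs_spec top g hs (top.length - 0) 0 top.length rfl
    (by omega) (le_refl _) (fun j hj => absurd hj (Nat.not_lt_zero j))
    (fun j hj hjl => absurd hjl (by omega))
  set r := bsL top g 0 top.length with hrdef
  have hins : insB top g = top.take r ++ g :: top.drop r := by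
    unfold insB
    rw [← hrdef]
    exact PySem.List.insert_natCast top r g hr
  have htk : ∀ x ∈ top.take r, x < g := by
    intro x hx
    obtain ⟨j, hj, hxe⟩ := List.mem_iff_getElem.1 hx
    have hjr : j < r := lt_of_lt_of_le hj (by rw [List.length_take]; omega)
    have hjl : j < top.length := by omega
    have := hlt j hjr
    rw [List.getD_eq_getElem top 0 hjl] at this
    rw [← hxe, List.getElem_take]
    exact this
  have hsplit2 : insG top g = top.take r ++ insG (top.drop r) g := by
    conv_lhs => rw [← List.take_append_drop r top]
    exact insG_append_of_lt _ _ _ htk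
  have hdr : insG (top.drop r) g = g :: top.drop r := by
    cases hd : top.drop r with
    | nil => simp [insG]
    | cons b t =>
        have hrlen : r < top.length := by
          by_contra hc
          rw [List.drop_eq_nil_of_le (by omega)] at hd
          cases hd
        have hb : g ≤ b := by
          have h1 := hge r (le_refl r) hrlen
          rw [List.getD_eq_getElem top 0 hrlen] at h1
          have h2 : top[r]? = some b := by
            rw [← List.head?_drop, hd, List.head?_cons]
          rw [List.getElem?_eq_getElem hrlen] at h2
          rwa [Option.some.inj h2] at h1
        simp [insG, if_pos hb]
  rw [hins, hsplit2, hdr]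

-- sorted(l ++ [g]) is insertion of g into sorted(l)
theorem sorted_append_singleton (l : List Int) (g : Int) :
    PySem.List.sorted (l ++ [g]) (fun x => x) false
      = insG (PySem.List.sorted l (fun x => x) false) g := by
  have hp : (PySem.List.sorted (l ++ [g]) (fun x => x) false).Perm
      (insG (PySem.List.sorted l (fun x => x) false) g) := by
    refine (PySem.List.sorted_perm _ _ _).trans (List.Perm.trans ?_ (insG_perm _ g).symm)
    exact (List.perm_append_singleton g l).trans
      ((PySem.List.sorted_perm l (fun x => x) false).symm.cons g)
  refine List.Perm.eq_of_pairwise (fun a b _ _ h1 h2 => le_antisymm h1 h2) ?_ ?_ hp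
  · simpa using PySem.List.sorted_pairwise (l ++ [g]) (fun x => x)
  · exact insG_sorted _ g (by simpa using PySem.List.sorted_pairwise l (fun x => x))

-- descending sort is the reverse of the ascending one (Int values: ties are identical)
theorem sorted_rev_eq_reverse (l : List Int) :
    PySem.List.sorted l (fun x => x) true
      = (PySem.List.sorted l (fun x => x) false).reverse := by
  have h1 : (PySem.List.sorted l (fun x => x) true).Perm
      ((PySem.List.sorted l (fun x => x) false).reverse) := by
    refine (PySem.List.sorted_perm l (fun x => x) true).trans ?_
    exact ((PySem.List.sorted_perm l (fun x => x) false).symm.trans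
      (List.reverse_perm _).symm)
  have h2 : (PySem.List.sorted l (fun x => x) true).Pairwise (fun a b : Int => b ≤ a) := by
    simpa using PySem.List.sorted_pairwise_rev l (fun x => x)
  have h3 : ((PySem.List.sorted l (fun x => x) false).reverse).Pairwise (fun a b : Int => b ≤ a) := by
    rw [List.pairwise_reverse]
    simpa using PySem.List.sorted_pairwise l (fun x => x)
  exact List.Perm.eq_of_pairwise (fun a b _ _ ha hb => le_antisymm hb ha) h2 h3 h1

-- the loop invariant: after the prefix l, keep is the tail of sorted(l) holding its K-1 largest
theorem keep_inv (K : Int) (l : List Int) :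
    l.foldl (stepK K) []
      = (PySem.List.sorted l (fun x => x) false).drop (l.length - (K - 1).toNat) := by
  induction l using List.reverseRecOn with
  | nil =>
      rw [show PySem.List.sorted ([] : List Int) (fun x => x) false = []
        from (PySem.List.sorted_eq_nil_iff [] (fun x => x) false).mpr rfl]
      simp
  | append_singleton l g ih =>
      rw [List.foldl_append, List.foldl_cons, List.foldl_nil, ih, sorted_append_singleton]
      have hslen : (PySem.List.sorted l (fun x => x) false).length = l.length :=
        PySem.List.length_sorted l (fun x => x) false
      set s := PySem.List.sorted l (fun x => x) false with hs
      set kk := (K - 1).toNat with hkk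
      set m := l.length with hm
      have hspw : s.Pairwise (· ≤ ·) := by
        simpa [hs] using PySem.List.sorted_pairwise l (fun x => x)
      have hlen' : (l ++ [g]).length = m + 1 := by simp [hm]
      rw [hlen']
      by_cases hmk : m < kk
      · -- buffer not yet full: plain insertion
        have hd0 : m - kk = 0 := by omega
        have hd0' : m + 1 - kk = 0 := by omega
        rw [hd0, hd0', List.drop_zero, List.drop_zero]
        have hcond : ((s.drop 0).length : Int) < K - 1 := by
          rw [List.drop_zero, hslen]; omega
        simp only [stepK, List.drop_zero] at hcond ⊢
        rw [if_pos hcond]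
        exact insB_eq_insG s g hspw
      · have hcond : ¬ (((s.drop (m - kk)).length : Int) < K - 1) := by
          rw [List.length_drop, hslen]; omega
        by_cases hk0 : kk = 0
        · -- K-1 ≤ 0: nothing is ever kept
          have ht : s.drop (m - kk) = [] := by
            apply List.drop_eq_nil_of_le; omega
          rw [ht]
          simp only [stepK, ht, List.length_nil] at hcond ⊢
          rw [if_neg (by simpa using hcond)]
          symm
          apply List.drop_eq_nil_of_le
          rw [insG_length, hslen]; omega
        · -- buffer full: t = b :: r with b its minimum
          have htlen : (s.drop (m - kk)).length = kk := by
            rw [List.length_drop, hslen]; omega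
          obtain ⟨b, r, ht⟩ : ∃ b r, s.drop (m - kk) = b :: r := by
            cases h : s.drop (m - kk) with
            | nil => rw [h] at htlen; simp at htlen; omega
            | cons b r => exact ⟨b, r, rfl⟩
          have hsplit : s = s.take (m - kk) ++ (b :: r) := by
            rw [← ht, List.take_append_drop]
          have hulen : (s.take (m - kk)).length = m - kk := by
            rw [List.length_take, hslen]; omega
          have hub : ∀ x ∈ s.take (m - kk), x ≤ b := by
            have := hsplit ▸ hspw
            rw [List.pairwise_append] at this
            intro x hx
            exact this.2.2 x hx b (by simp)
          rw [ht]
          simp only [stepK]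
          rw [if_neg (by rw [ht] at hcond; simpa using hcond)]
          by_cases hbg : b < g
          · rw [if_pos hbg]
            have hdpw : (b :: r).Pairwise (· ≤ ·) := by
              rw [← ht]; exact hspw.drop
            rw [insB_eq_insG r g hdpw.of_cons]
            have hall : ∀ x ∈ s.take (m - kk) ++ [b], x < g := by
              intro x hx
              rcases List.mem_append.1 hx with h1 | h1
              · exact lt_of_le_of_lt (hub x h1) hbg
              · simpa using (List.mem_singleton.1 h1) ▸ hbg
            have hs2 : (s.take (m - kk) ++ [b]) ++ r = s := by
              rw [List.append_assoc, List.singleton_append]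
              exact hsplit.symm
            have h1 : insG s g = (s.take (m - kk) ++ [b]) ++ insG r g := by
              conv_lhs => rw [← hs2]
              exact insG_append_of_lt _ _ _ hall
            rw [h1]
            rw [show m + 1 - kk = (s.take (m - kk) ++ [b]).length by simp [hulen]; omega]
            exact List.drop_left.symm
          · rw [if_neg hbg]
            rw [not_lt] at hbg
            by_cases hcase : ∀ x ∈ s.take (m - kk), x < g
            · have h1 : insG s g = (s.take (m - kk) ++ [g]) ++ (b :: r) := by
                conv_lhs => rw [hsplit]
                rw [insG_append_of_lt _ _ _ hcase]
                simp [insG, if_pos hbg]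
              rw [h1]
              rw [show m + 1 - kk = (s.take (m - kk) ++ [g]).length by simp [hulen]; omega]
              exact List.drop_left.symm
            · simp only [not_forall, not_lt, exists_prop] at hcase
              obtain ⟨x, hx, hgx⟩ := hcase
              have h1 : insG s g = insG (s.take (m - kk)) g ++ (b :: r) := by
                conv_lhs => rw [hsplit]
                exact insG_append_of_ge _ _ _ ⟨x, hx, hgx⟩
              rw [h1]
              rw [show m + 1 - kk = (insG (s.take (m - kk)) g).length by
                rw [insG_length, hulen]; omega]
              exact List.drop_left.symm

-- telescoping: the gaps of p sum to p[n] - p[0]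
theorem telescope (p : List Int) (n : Nat) :
    (((List.range n).map (fun i => p.getD (i + 1) 0 - p.getD i 0)).sum)
      = p.getD n 0 - p.getD 0 0 := by
  induction n with
  | zero => simp
  | succ m ih =>
      rw [List.range_succ]
      simp only [List.map_append, List.map_cons, List.map_nil, List.sum_append, List.sum_cons,
        List.sum_nil]
      rw [ih]
      ring

-- the gaps of p (indices 0..N-2) sum to the span p[N-1] - p[0]
theorem gaps_sum (p : List Int) (N : Int) (h2 : 2 ≤ N) :
    ((PySem.List.pyRange 0 (N - 1) 1).map
      (fun i => PySem.List.pyGetD p (i + 1) 0 - PySem.List.pyGetD p i 0)).sum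
      = PySem.List.pyGetD p (N - 1) 0 - PySem.List.pyGetD p 0 0 := by
  rw [PySem.List.pyRange_one, List.map_map]
  have hfun : ((fun i => PySem.List.pyGetD p (i + 1) 0 - PySem.List.pyGetD p i 0)
        ∘ (fun k : Nat => (0 : Int) + (k : Int)))
      = fun k : Nat => p.getD (k + 1) 0 - p.getD k 0 := by
    funext k
    simp only [Function.comp, zero_add]
    rw [show ((k : Int) + 1) = ((k + 1 : Nat) : Int) by push_cast; ring]
    rw [PySem.List.pyGetD_natCast, PySem.List.pyGetD_natCast]
  rw [hfun, telescope]
  conv_rhs => rw [show (N - 1) = (((N - 1).toNat : Nat) : Int) by omega]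
  rw [PySem.List.pyGetD_natCast, PySem.List.pyGetD_zero]
  rw [show (N - 1 - 0).toNat = (N - 1).toNat by omega]

-- ===== VERDICT (by name: the statement is the Claim_ definition above) =====
theorem result_spec : Claim_equal_result := by
  intro N K pos _ hpre
  unfold Spec_result result result_alt
  simp only []
  by_cases hKN : K > N
  · simp [hKN]
  · have hK : K ≤ N := not_lt.1 hKN
    rw [if_neg hKN]
    by_cases hN2 : N < 2
    · rw [if_pos (Or.inr hN2)]
      rw [PySem.List.pyRange_one_eq_nil (by omega : N - 1 ≤ 0),
          PySem.List.pyRange_one_eq_nil (by omega : K - 1 ≤ 0)]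
      rfl
    · rw [if_neg (not_or.mpr ⟨hKN, hN2⟩)]
      have hN2' : 2 ≤ N := not_lt.1 hN2
      have hlen : N ≤ (pos.length : Int) := by
        rcases hpre with h | h | h
        · exact h
        · omega
        · omega
      have hplen : (PySem.List.sorted pos (fun x => x) false).length = pos.length :=
        PySem.List.length_sorted pos (fun x => x) false
      set p := PySem.List.sorted pos (fun x => x) false with hp
      set gaps := (PySem.List.pyRange 0 (N - 1) 1).map
        (fun i => PySem.List.pyGetD p (i + 1) 0 - PySem.List.pyGetD p i 0) with hgaps
      have hglen : gaps.length = (N - 1).toNat := by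
        rw [hgaps, List.length_map, PySem.List.length_pyRange_one]; omega
      -- A's gap list is gaps
      rw [foldl_app_map (fun i => PySem.List.pyGetD p (i + 1) 0 - PySem.List.pyGetD p i 0)]
      rw [List.nil_append]
      -- A's pop loop drops (K-1).toNat elements
      have hdlen : (PySem.List.sorted gaps (fun x => x) true).length = (N - 1).toNat := by
        rw [PySem.List.length_sorted, hglen]
      rw [foldl_pop_drop _ _ (by rw [PySem.List.length_pyRange_one, hdlen]; omega)]
      rw [PySem.List.length_pyRange_one]
      rw [show ((K : Int) - 1 - 0) = K - 1 from by ring]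
      -- B's keep is the tail of the ascending sort
      rw [keep_inv, hglen]
      rw [sorted_rev_eq_reverse, List.drop_reverse, List.sum_reverse]
      rw [PySem.List.length_sorted, hglen]
      -- sums: take + drop = whole = telescoped span
      have hsum : (PySem.List.sorted gaps (fun x => x) false).sum = gaps.sum :=
        (PySem.List.sorted_perm gaps (fun x => x) false).sum_eq
      have hsplit : (List.take ((N - 1).toNat - (K - 1).toNat)
            (PySem.List.sorted gaps (fun x => x) false)).sum
          + (List.drop ((N - 1).toNat - (K - 1).toNat)
            (PySem.List.sorted gaps (fun x => x) false)).sum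
          = gaps.sum := by
        rw [← hsum, ← List.sum_append, List.take_append_drop]
      have htel : gaps.sum = PySem.List.pyGetD p (N - 1) 0 - PySem.List.pyGetD p 0 0 :=
        gaps_sum p N hN2'
      rw [← hgaps]
      omega
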